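-- pv_equiv track=rewrite | github.com/Gerloutis/automacao | planejamento.py | expandir_merge
-- ===== SOURCE A (Python) =====
-- def expandir_merge(header):
--
--     novo = []
--     atual = ""
--
--     for h in header:
--         if h.strip():
--             atual = h
--         novo.append(atual)
--
--     return novo
-- ===== SOURCE B (Python) =====
-- def expandir_merge(header):
--     # For each position i, scan backwards from i for the nearest non-blank cell;
--     # no carried state between positions (brute-force per-index lookup).
--     out = []
--     for i in range(len(header)):
--         val = ""
--         for j in range(i, -1, -1):
--             if header[j].strip():
--                 val = header[j]
--                 break
--         out.append(val)
--     return out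
-- ===== Notes on version B (the rewrite author's own statement) =====
-- stated objective: alternative
-- what changed: Replaces the single forward pass with a carried accumulator by a stateless per-index backward scan: for each position it searches backwards for the nearest non-blank cell (O(n^2) brute force, no threaded state).
import Mathlib
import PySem

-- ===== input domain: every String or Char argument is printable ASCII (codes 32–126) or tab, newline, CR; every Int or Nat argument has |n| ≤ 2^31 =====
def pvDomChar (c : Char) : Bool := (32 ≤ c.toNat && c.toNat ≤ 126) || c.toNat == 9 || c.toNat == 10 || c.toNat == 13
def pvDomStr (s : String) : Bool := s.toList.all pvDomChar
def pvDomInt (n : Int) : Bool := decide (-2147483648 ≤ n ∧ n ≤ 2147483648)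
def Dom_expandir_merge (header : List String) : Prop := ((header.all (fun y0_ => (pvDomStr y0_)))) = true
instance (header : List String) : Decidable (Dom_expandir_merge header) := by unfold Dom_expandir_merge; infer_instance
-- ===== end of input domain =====

-- B replaces A's single forward pass with a carried accumulator by a stateless
-- per-index backward scan for the nearest non-blank cell; objective: alternative (not faster).
-- ===== PORT A =====
-- for-loop over header carrying (novo, atual); returns novo
def expandir_merge (header : List String) : List String :=
  (header.foldl (fun (st : List String × String) h =>
    let atual := if PySem.Str.strip h ≠ "" then h else st.2
    (st.1 ++ [atual], atual)) ([], "")).1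

-- ===== PORT B =====
-- inner loop: 'for j in range(i, -1, -1): if header[j].strip(): val = header[j]; break'
-- (j descends from i to 0; val stays "" if no non-blank cell is found)
def pvFindBack (header : List String) : Nat → String
  | 0 => if PySem.Str.strip (header.getD 0 "") ≠ "" then header.getD 0 "" else ""
  | j+1 => if PySem.Str.strip (header.getD (j+1) "") ≠ "" then header.getD (j+1) ""
           else pvFindBack header j

-- outer loop: 'for i in range(len(header)): … out.append(val)'
def expandir_merge_alt (header : List String) : List String :=
  (List.range header.length).map (fun i => pvFindBack header i)

-- ===== PRECONDITION & SPEC =====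
def Spec_expandir_merge (header : List String) (out : List String) : Prop := out = expandir_merge_alt header
instance (header : List String) (out : List String) : Decidable (Spec_expandir_merge header out) := by unfold Spec_expandir_merge; infer_instance

-- ===== CLAIM (what is proved, stated in full; the proofs are below) =====
def Claim_equal_expandir_merge : Prop := ∀ (header : List String), Dom_expandir_merge header → Spec_expandir_merge header (expandir_merge header)

-- ===== LEMMAS AND PROOFS =====

-- A's fold, started from any (novo, atual), appends the scanl tail of the update function
lemma expandir_merge_fold_scan (l : List String) (novo : List String) (atual : String) :
    (l.foldl (fun (st : List String × String) h =>
      let a := if PySem.Str.strip h ≠ "" then h else st.2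
      (st.1 ++ [a], a)) (novo, atual)).1
    = novo ++ (List.scanl (fun prev h => if PySem.Str.strip h ≠ "" then h else prev) atual l).tail := by
  induction l generalizing novo atual with
  | nil => simp
  | cons h t ih =>
    simp only [List.foldl_cons, List.scanl_cons, List.tail_cons]
    rw [ih]
    cases ht : List.scanl (fun prev h => if PySem.Str.strip h ≠ "" then h else prev) (if PySem.Str.strip h ≠ "" then h else atual) t with
    | nil => exact absurd ht (by simp [List.scanl_ne_nil])
    | cons x xs =>
      have hx : x = (if PySem.Str.strip h ≠ "" then h else atual) := by
        have := congrArg List.head? ht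
        simpa using this.symm
      simp [hx]

-- the scanl tail, written pointwise: element i is the fold over the first i+1 elements
lemma scanl_tail_map (f : String → String → String) (a : String) (l : List String) :
    (List.scanl f a l).tail
    = (List.range l.length).map (fun i => (l.take (i+1)).foldl f a) := by
  induction l generalizing a with
  | nil => simp
  | cons h t ih =>
    simp only [List.scanl_cons, List.tail_cons, List.length_cons]
    rw [List.range_succ_eq_map, List.map_cons, List.map_map]
    simp only [List.take_succ_cons, List.foldl_cons]
    have hd : List.scanl f (f a h) t = (f a h) :: (List.scanl f (f a h) t).tail := by
      cases t <;> simp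
    rw [hd, ih (f a h)]
    simp [Function.comp]

-- the fold over the first i+1 elements is exactly B's backward search from i
lemma foldl_take_findBack (header : List String) (i : Nat) (hi : i < header.length) :
    (header.take (i+1)).foldl (fun prev h => if PySem.Str.strip h ≠ "" then h else prev) ""
    = pvFindBack header i := by
  induction i with
  | zero =>
    cases header with
    | nil => simp at hi
    | cons h t => simp [pvFindBack]
  | succ j ih =>
    have hj : j < header.length := Nat.lt_of_succ_lt hi
    have hget : header.take (j+2) = header.take (j+1) ++ [header.getD (j+1) ""] := by
      rw [List.take_add_one]
      simp [List.getD, List.getElem?_eq_getElem hi]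
    rw [hget, List.foldl_append, ih hj]
    simp [pvFindBack]

-- ===== VERDICT (by name: the statement is the Claim_ definition above) =====
theorem expandir_merge_spec : Claim_equal_expandir_merge := by
  intro header _
  unfold Spec_expandir_merge expandir_merge expandir_merge_alt
  rw [expandir_merge_fold_scan header [] "", scanl_tail_map]
  simp only [List.nil_append]
  exact List.map_congr_left (fun i hi =>
    foldl_take_findBack header i (List.mem_range.mp hi))
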